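-- pv_equiv track=rewrite | github.com/bcrowe306/MPC-Studio-Mk2-Midi-Sysex-Charts | python-lcd-poc/lib/pythonbmp/bufresize.py | unpack4bitbufresizeNtimesbigger
-- ===== SOURCE A (Python) =====
-- def unpack4bitbufresizeNtimesbigger(
--         buf: list[int], n: int
--         ) -> list[int]:
--     """Unpacks a 4-bit buffer into a
--         list and repeats 4-bit units
--         to resize the buffer int n
--         times bigger
--
--     Args:
--         buf: unsigned byte array
--         n  : unsigned int multiplier
--              to resize buffer
--
--     Returns:
--         list
--     """
--     retval = []
--     for b in buf:
--         retval += [b >> 4] * n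
--         retval += [b & 0xf] * n
--     return retval
-- ===== SOURCE B (Python) =====
-- def unpack4bitbufresizeNtimesbigger(
--         buf: list[int], n: int
--         ) -> list[int]:
--     def nib(k):
--         b = buf[k // (2 * n)]
--         return b >> 4 if (k // n) % 2 == 0 else b & 0xf
--     return [nib(k) for k in range(2 * len(buf) * n)]
-- ===== Notes on version B (the rewrite author's own statement) =====
-- stated objective: alternative
-- what changed: Replaces A's sequential loop that appends two replicated runs per byte with a non-sequential index-arithmetic construction: the k-th output element is computed directly from k by integer division (byte index k//(2n), high/low nibble from the parity of k//n) over range(2*len(buf)*n).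
import Mathlib
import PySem

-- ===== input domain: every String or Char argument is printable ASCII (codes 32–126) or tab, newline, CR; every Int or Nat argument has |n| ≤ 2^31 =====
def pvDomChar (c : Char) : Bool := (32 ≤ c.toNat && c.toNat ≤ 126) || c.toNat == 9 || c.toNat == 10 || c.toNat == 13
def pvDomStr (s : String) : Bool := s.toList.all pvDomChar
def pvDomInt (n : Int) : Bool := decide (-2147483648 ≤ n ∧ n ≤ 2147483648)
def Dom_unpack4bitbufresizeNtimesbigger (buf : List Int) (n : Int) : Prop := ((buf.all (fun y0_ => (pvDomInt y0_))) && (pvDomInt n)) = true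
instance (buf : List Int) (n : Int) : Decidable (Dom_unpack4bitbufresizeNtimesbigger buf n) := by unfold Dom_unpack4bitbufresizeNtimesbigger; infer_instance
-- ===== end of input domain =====

-- ===== PORT A =====
-- A: one fused loop; per byte append n copies of the high nibble then n copies of the low nibble.
-- b >> 4 = floordiv b 16 and b & 0xf = mod b 16 exactly (Python semantics, incl. negative b);
-- [x] * n with n ≤ 0 is [] (List.replicate n.toNat).
def unpack4bitbufresizeNtimesbigger (buf : List Int) (n : Int) : List Int :=
  buf.foldl (fun retval b =>
    (retval ++ List.replicate n.toNat (PySem.Int.floordiv b 16))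
      ++ List.replicate n.toNat (PySem.Int.mod b 16)) []

-- ===== PORT B =====
-- B restructures the task as index arithmetic: the k-th output element is computed
-- directly from k by integer division (which byte, which nibble), no sequential
-- appending at all; an alternative decomposition, same cost.
-- In Source B buf[k // (2*n)] is always in range for k in range(2*len(buf)*n), so the
-- .getD 0 default is never used (exact port of the always-succeeding indexing).
def pvNib (buf : List Int) (n : Int) (k : Int) : Int :=
  let b := (PySem.List.pyGet? buf (PySem.Int.floordiv k (2 * n))).getD 0
  if PySem.Int.mod (PySem.Int.floordiv k n) 2 = 0 then PySem.Int.floordiv b 16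
  else PySem.Int.mod b 16

def unpack4bitbufresizeNtimesbigger_alt (buf : List Int) (n : Int) : List Int :=
  (PySem.List.pyRange 0 (2 * (buf.length : Int) * n) 1).map (pvNib buf n)

-- ===== PRECONDITION & SPEC =====
def Spec_unpack4bitbufresizeNtimesbigger (buf : List Int) (n : Int) (out : List Int) : Prop := out = unpack4bitbufresizeNtimesbigger_alt buf n
instance (buf : List Int) (n : Int) (out : List Int) : Decidable (Spec_unpack4bitbufresizeNtimesbigger buf n out) := by unfold Spec_unpack4bitbufresizeNtimesbigger; infer_instance

-- ===== CLAIM =====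
def Claim_equal_unpack4bitbufresizeNtimesbigger : Prop := ∀ (buf : List Int) (n : Int), Dom_unpack4bitbufresizeNtimesbigger buf n → Spec_unpack4bitbufresizeNtimesbigger buf n (unpack4bitbufresizeNtimesbigger buf n)

-- ===== LEMMAS AND PROOFS =====

theorem pv_foldl_acc (buf : List Int) (n : Int) (acc : List Int) :
    buf.foldl (fun retval b =>
      (retval ++ List.replicate n.toNat (PySem.Int.floordiv b 16))
        ++ List.replicate n.toNat (PySem.Int.mod b 16)) acc
      = acc ++ buf.flatMap (fun b =>
          List.replicate n.toNat (PySem.Int.floordiv b 16)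
            ++ List.replicate n.toNat (PySem.Int.mod b 16)) := by
  induction buf generalizing acc with
  | nil => simp
  | cons b bs ih =>
    simp only [List.foldl_cons, ih]
    simp [List.flatMap_cons, List.append_assoc]

theorem pv_map_const_of_mem {α : Type} (l : List α) (f : α → Int) (c : Int)
    (h : ∀ x ∈ l, f x = c) : l.map f = List.replicate l.length c := by
  rw [List.map_congr_left h, List.map_const']

theorem pv_main (buf : List Int) (n : Int) (hn : 0 < n) :
    buf.flatMap (fun b =>
        List.replicate n.toNat (PySem.Int.floordiv b 16)
          ++ List.replicate n.toNat (PySem.Int.mod b 16))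
      = unpack4bitbufresizeNtimesbigger_alt buf n := by
  induction buf using List.reverseRecOn with
  | nil => simp [unpack4bitbufresizeNtimesbigger_alt]
  | append_singleton bs b ih =>
    have hL : (0:Int) ≤ (bs.length : Int) := by positivity
    have hM : (0:Int) ≤ 2 * (bs.length : Int) * n := by positivity
    set M : Int := 2 * (bs.length : Int) * n with hMdef
    have hlen : ((bs ++ [b]).length : Int) = (bs.length : Int) + 1 := by
      simp
    have hsplit : PySem.List.pyRange 0 (2 * ((bs ++ [b]).length : Int) * n) 1
        = PySem.List.pyRange 0 M 1 ++ PySem.List.pyRange M (M + n) 1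
            ++ PySem.List.pyRange (M + n) (M + 2 * n) 1 := by
      have h2 : 2 * ((bs ++ [b]).length : Int) * n = M + 2 * n := by
        rw [hlen]; ring
      rw [h2,
        PySem.List.pyRange_one_append 0 M (M + 2 * n) hM (by omega),
        PySem.List.pyRange_one_append M (M + n) (M + 2 * n) (by omega) (by omega)]
      simp [List.append_assoc]
    -- piece 1: on [0, M) the new last byte is invisible
    have hpiece1 : (PySem.List.pyRange 0 M 1).map (pvNib (bs ++ [b]) n)
        = (PySem.List.pyRange 0 M 1).map (pvNib bs n) := by
      apply List.map_congr_left
      intro k hk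
      rw [PySem.List.mem_pyRange_one] at hk
      have hj0 : (0:Int) ≤ PySem.Int.floordiv k (2 * n) := by
        rw [PySem.Int.le_floordiv_iff_mul_le (by omega : (0:Int) < 2*n)]; omega
      have hjL : PySem.Int.floordiv k (2 * n) < (bs.length : Int) := by
        rw [PySem.Int.floordiv_lt_iff_lt_mul (by omega : (0:Int) < 2*n)]
        calc k < M := hk.2
        _ = (bs.length : Int) * (2 * n) := by rw [hMdef]; ring
      have hget : PySem.List.pyGet? (bs ++ [b]) (PySem.Int.floordiv k (2 * n))
          = PySem.List.pyGet? bs (PySem.Int.floordiv k (2 * n)) := by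
        rw [PySem.List.pyGet?_of_nonneg _ hj0, PySem.List.pyGet?_of_nonneg _ hj0,
          List.getElem?_append_left (by omega)]
      simp only [pvNib, hget]
    -- piece 2: on [M, M+n) every index selects the high nibble of b
    have hpiece2 : (PySem.List.pyRange M (M + n) 1).map (pvNib (bs ++ [b]) n)
        = List.replicate n.toNat (PySem.Int.floordiv b 16) := by
      rw [pv_map_const_of_mem _ _ _ ?_ , PySem.List.length_pyRange_one]
      · congr 1; omega
      · intro k hk
        rw [PySem.List.mem_pyRange_one] at hk
        have hd1 : PySem.Int.floordiv k (2 * n) = (bs.length : Int) := by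
          rw [PySem.Int.floordiv_eq_iff_of_pos (by omega)]
          constructor
          · calc (bs.length : Int) * (2 * n) = M := by rw [hMdef]; ring
            _ ≤ k := hk.1
          · calc k < M + n := hk.2
            _ ≤ M + 2 * n := by omega
            _ = ((bs.length : Int) + 1) * (2 * n) := by rw [hMdef]; ring
        have hd2 : PySem.Int.floordiv k n = 2 * (bs.length : Int) := by
          rw [PySem.Int.floordiv_eq_iff_of_pos (by omega)]
          constructor
          · calc 2 * (bs.length : Int) * n = M := hMdef.symm
            _ ≤ k := hk.1
          · calc k < M + n := hk.2
            _ = (2 * (bs.length : Int) + 1) * n := by rw [hMdef]; ring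
        simp [pvNib, hd1, hd2]
    -- piece 3: on [M+n, M+2n) every index selects the low nibble of b
    have hpiece3 : (PySem.List.pyRange (M + n) (M + 2 * n) 1).map (pvNib (bs ++ [b]) n)
        = List.replicate n.toNat (PySem.Int.mod b 16) := by
      rw [pv_map_const_of_mem _ _ _ ?_ , PySem.List.length_pyRange_one]
      · congr 1; omega
      · intro k hk
        rw [PySem.List.mem_pyRange_one] at hk
        have hd1 : PySem.Int.floordiv k (2 * n) = (bs.length : Int) := by
          rw [PySem.Int.floordiv_eq_iff_of_pos (by omega)]
          constructor
          · calc (bs.length : Int) * (2 * n) = M := by rw [hMdef]; ring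
            _ ≤ M + n := by omega
            _ ≤ k := hk.1
          · calc k < M + 2 * n := hk.2
            _ = ((bs.length : Int) + 1) * (2 * n) := by rw [hMdef]; ring
        have hd2 : PySem.Int.floordiv k n = 2 * (bs.length : Int) + 1 := by
          rw [PySem.Int.floordiv_eq_iff_of_pos (by omega)]
          constructor
          · calc (2 * (bs.length : Int) + 1) * n = M + n := by rw [hMdef]; ring
            _ ≤ k := hk.1
          · calc k < M + 2 * n := hk.2
            _ = (2 * (bs.length : Int) + 1 + 1) * n := by rw [hMdef]; ring
        simp [pvNib, hd1, hd2]
    rw [List.flatMap_append, ih]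
    simp only [unpack4bitbufresizeNtimesbigger_alt, hsplit, List.map_append,
      hpiece1, hpiece2, hpiece3, List.flatMap_cons, List.flatMap_nil,
      List.append_nil, List.append_assoc, ← hMdef]

theorem pv_nonpos (buf : List Int) (n : Int) (hn : n ≤ 0) :
    buf.flatMap (fun b =>
        List.replicate n.toNat (PySem.Int.floordiv b 16)
          ++ List.replicate n.toNat (PySem.Int.mod b 16))
      = unpack4bitbufresizeNtimesbigger_alt buf n := by
  have h0 : n.toNat = 0 := by omega
  have hr : 2 * (buf.length : Int) * n ≤ 0 := by
    apply mul_nonpos_of_nonneg_of_nonpos _ hn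
    positivity
  rw [unpack4bitbufresizeNtimesbigger_alt, PySem.List.pyRange_one_eq_nil hr]
  simp [h0, List.flatMap_eq_nil_iff]

-- ===== VERDICT =====
theorem unpack4bitbufresizeNtimesbigger_spec : Claim_equal_unpack4bitbufresizeNtimesbigger := by
  intro buf n _
  unfold Spec_unpack4bitbufresizeNtimesbigger unpack4bitbufresizeNtimesbigger
  rw [pv_foldl_acc buf n [], List.nil_append]
  rcases le_or_gt n 0 with hn | hn
  · exact pv_nonpos buf n hn
  · exact pv_main buf n hn
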